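-- pv_equiv track=rewrite | github.com/Amoeba115/newschedule | scheduler_app.py | parse_summary_file
-- ===== SOURCE A (Python) =====
-- def parse_summary_file(file_content):
--     employees, current_employee = [], {}
--     for line in file_content.splitlines():
--         line = line.strip()
--         if not line: continue
--         if line.startswith("--- Employee"):
--             if current_employee: employees.append(current_employee)
--             current_employee = {}
--         elif ":" in line:
--             key, value = line.split(":", 1)
--             current_employee[key.strip()] = value.strip()
--     if current_employee: employees.append(current_employee)
--     return employees
-- ===== SOURCE B (Python) =====
-- def parse_summary_file(file_content):
--     # Phase 1: strip lines, drop empties, then group into blocks at marker lines.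
--     lines = [l for l in (raw.strip() for raw in file_content.splitlines()) if l]
--     blocks, cur = [], []
--     for line in lines:
--         if line.startswith("--- Employee"):
--             blocks.append(cur)
--             cur = []
--         else:
--             cur.append(line)
--     blocks.append(cur)
--     # Phase 2: turn each block into a dict; keep only non-empty dicts.
--     result = []
--     for block in blocks:
--         d = {}
--         for line in block:
--             if ":" in line:
--                 key, value = line.split(":", 1)
--                 d[key.strip()] = value.strip()
--         if d:
--             result.append(d)
--     return result
-- ===== Notes on version B (the rewrite author's own statement) =====
-- stated objective: alternative
-- what changed: Replaces A's single streaming accumulator over raw lines with a two-phase group-then-map structure: first split the stripped non-empty lines into blocks at '--- Employee' markers (with a leading block for pre-marker lines), then build each block's dict independently and keep the non-empty ones.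
import Mathlib
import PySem

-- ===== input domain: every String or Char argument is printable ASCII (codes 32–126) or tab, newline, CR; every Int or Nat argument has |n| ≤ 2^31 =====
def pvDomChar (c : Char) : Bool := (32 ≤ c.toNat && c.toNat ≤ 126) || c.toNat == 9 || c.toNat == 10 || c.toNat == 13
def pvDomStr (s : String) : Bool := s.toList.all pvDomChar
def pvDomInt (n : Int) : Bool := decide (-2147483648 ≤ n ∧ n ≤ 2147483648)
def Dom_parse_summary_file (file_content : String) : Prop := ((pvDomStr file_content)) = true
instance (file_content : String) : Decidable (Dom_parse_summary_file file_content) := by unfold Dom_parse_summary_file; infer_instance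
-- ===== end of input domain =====

-- B replaces A's single streaming accumulator with a two-phase group-then-map decomposition
-- (group stripped non-empty lines into blocks at '--- Employee' markers, then build each block's dict);
-- equivalence of the return values is proved, neither mutates its argument.

-- ===== PORT A =====
-- 'current_employee[key.strip()] = value.strip()' for a line containing ':'
def pvUpdA (d : PySem.Dict String String) (line : String) : PySem.Dict String String :=
  match PySem.Str.splitMax? line ":" 1 with
  | some (key :: value :: _) => d.insert (PySem.Str.strip key) (PySem.Str.strip value)
  | _ => d

-- one iteration of A's loop over a raw line, state = (employees, current_employee)
def pvStepA (st : List (PySem.Dict String String) × PySem.Dict String String) (rawLine : String) :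
    List (PySem.Dict String String) × PySem.Dict String String :=
  let line := PySem.Str.strip rawLine
  if PySem.Str.len line = 0 then st
  else if PySem.Str.startswith line "--- Employee" then
    (if st.2.items ≠ [] then st.1 ++ [st.2] else st.1, PySem.Dict.empty)
  else if PySem.Str.isIn ":" line then (st.1, pvUpdA st.2 line)
  else st

def parse_summary_file (file_content : String) : List (List (String × String)) :=
  let st := (PySem.Str.splitlines file_content).foldl pvStepA ([], PySem.Dict.empty)
  let employees := if st.2.items ≠ [] then st.1 ++ [st.2] else st.1
  employees.map (·.items)

-- ===== PORT B =====
-- phase 1: grouping step, state = (blocks, cur)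
def pvStepB (st : List (List String) × List String) (line : String) :
    List (List String) × List String :=
  if PySem.Str.startswith line "--- Employee" then (st.1 ++ [st.2], [])
  else (st.1, st.2 ++ [line])

-- phase 2: a block's dict
def pvDictOf (block : List String) : PySem.Dict String String :=
  block.foldl (fun d line => if PySem.Str.isIn ":" line then pvUpdA d line else d) PySem.Dict.empty

def parse_summary_file_alt (file_content : String) : List (List (String × String)) :=
  let lines := ((PySem.Str.splitlines file_content).map PySem.Str.strip).filter
    (fun l => PySem.Str.len l ≠ 0)
  let st := lines.foldl pvStepB ([], [])
  let blocks := st.1 ++ [st.2]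
  (((blocks.map pvDictOf).filter (fun d => d.items ≠ [])).map (·.items))

-- ===== PRECONDITION & SPEC =====
def Spec_parse_summary_file (file_content : String) (out : List (List (String × String))) : Prop := out = parse_summary_file_alt file_content
instance (file_content : String) (out : List (List (String × String))) : Decidable (Spec_parse_summary_file file_content out) := by unfold Spec_parse_summary_file; infer_instance

-- ===== CLAIM (what is proved, stated in full; the proofs are below) =====
def Claim_equal_parse_summary_file : Prop := ∀ (file_content : String), Dom_parse_summary_file file_content → Spec_parse_summary_file file_content (parse_summary_file file_content)

-- ===== LEMMAS AND PROOFS =====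

-- A's loop body once the line is already stripped and non-empty (strip hoisted out)
def pvStepA' (st : List (PySem.Dict String String) × PySem.Dict String String) (line : String) :
    List (PySem.Dict String String) × PySem.Dict String String :=
  if PySem.Str.startswith line "--- Employee" then
    (if st.2.items ≠ [] then st.1 ++ [st.2] else st.1, PySem.Dict.empty)
  else if PySem.Str.isIn ":" line then (st.1, pvUpdA st.2 line)
  else st

theorem pvStepA_skip (st : List (PySem.Dict String String) × PySem.Dict String String)
    (x : String) (h : PySem.Str.len (PySem.Str.strip x) = 0) : pvStepA st x = st := by
  simp only [pvStepA]; rw [if_pos h]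

theorem pvStepA_go (st : List (PySem.Dict String String) × PySem.Dict String String)
    (x : String) (h : ¬ PySem.Str.len (PySem.Str.strip x) = 0) :
    pvStepA st x = pvStepA' st (PySem.Str.strip x) := by
  simp only [pvStepA, pvStepA']; rw [if_neg h]

-- folding A's step over raw lines = folding the strip-free step over the stripped non-empty lines
theorem pvFoldA_norm (lines : List String)
    (st : List (PySem.Dict String String) × PySem.Dict String String) :
    lines.foldl pvStepA st
      = (((lines.map PySem.Str.strip).filter (fun l => PySem.Str.len l ≠ 0)).foldl pvStepA' st) := by
  induction lines generalizing st with
  | nil => simp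
  | cons x t ih =>
    simp only [List.map_cons, List.foldl_cons, List.filter_cons]
    by_cases h : PySem.Str.len (PySem.Str.strip x) = 0
    · have h' : PySem.Chars.strip x.toList = [] := by simpa using h
      rw [pvStepA_skip st x h]; simp [h', ih]
    · have h' : ¬ PySem.Chars.strip x.toList = [] := by simpa using h
      rw [pvStepA_go st x h]; simp [h', ih]

-- the grouping fold only appends to the accumulated block list
theorem pvFoldB_shift (ls : List String) (bs : List (List String)) (b : List String) :
    ls.foldl pvStepB (bs, b)
      = (bs ++ (ls.foldl pvStepB ([], b)).1, (ls.foldl pvStepB ([], b)).2) := by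
  induction ls generalizing bs b with
  | nil => simp
  | cons x t ih =>
    simp only [List.foldl_cons, pvStepB]
    by_cases h : PySem.Str.startswith x "--- Employee" = true
    · rw [if_pos h, if_pos h, ih (bs ++ [b]) [], ih ([] ++ [b]) []]
      simp
    · rw [if_neg h, if_neg h]
      exact ih bs (b ++ [x])

-- dict of a block extended by one line
theorem pvDictOf_append (b : List String) (l : String) :
    pvDictOf (b ++ [l]) = if PySem.Str.isIn ":" l then pvUpdA (pvDictOf b) l else pvDictOf b := by
  simp [pvDictOf]

-- main invariant: A's fold from (emps, cur), finished by the trailing append,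
-- equals emps ++ B's block processing with the open block b whose dict is cur
theorem pvMain (ls : List String) (emps : List (PySem.Dict String String))
    (cur : PySem.Dict String String) (b : List String) (hb : pvDictOf b = cur) :
    (if (ls.foldl pvStepA' (emps, cur)).2.items ≠ []
       then (ls.foldl pvStepA' (emps, cur)).1 ++ [(ls.foldl pvStepA' (emps, cur)).2]
       else (ls.foldl pvStepA' (emps, cur)).1)
      = emps ++ ((((ls.foldl pvStepB ([], b)).1 ++ [(ls.foldl pvStepB ([], b)).2]).map
          pvDictOf).filter (fun d => d.items ≠ [])) := by
  induction ls generalizing emps cur b with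
  | nil =>
    simp only [List.foldl_nil, ← hb]
    by_cases h : (pvDictOf b).items = [] <;> simp [h]
  | cons x t ih =>
    simp only [List.foldl_cons]
    by_cases hm : PySem.Str.startswith x "--- Employee" = true
    · have hA : pvStepA' (emps, cur) x
          = (if cur.items ≠ [] then emps ++ [cur] else emps, PySem.Dict.empty) := by
        simp only [pvStepA']; rw [if_pos hm]
      have hB : pvStepB ([], b) x = ([b], []) := by
        simp only [pvStepB]; rw [if_pos hm]; simp
      rw [hA, hB, pvFoldB_shift t [b] [], ih _ PySem.Dict.empty [] rfl]
      by_cases h : (pvDictOf b).items = [] <;>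
        simp [← hb, h, List.filter_cons, List.append_assoc]
    · have hB : pvStepB ([], b) x = ([], b ++ [x]) := by
        simp only [pvStepB]; rw [if_neg hm]
      rw [hB]
      by_cases hc : PySem.Str.isIn ":" x = true
      · have hA : pvStepA' (emps, cur) x = (emps, pvUpdA cur x) := by
          simp only [pvStepA']; rw [if_neg hm, if_pos hc]
        rw [hA, ih emps (pvUpdA cur x) (b ++ [x]) (by rw [pvDictOf_append, if_pos hc, hb])]
      · have hA : pvStepA' (emps, cur) x = (emps, cur) := by
          simp only [pvStepA']; rw [if_neg hm, if_neg hc]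
        rw [hA, ih emps cur (b ++ [x]) (by rw [pvDictOf_append, if_neg hc, hb])]

-- ===== VERDICT (by name: the statement is the Claim_ definition above) =====
theorem parse_summary_file_spec : Claim_equal_parse_summary_file := by
  intro fc _
  unfold Spec_parse_summary_file parse_summary_file parse_summary_file_alt
  dsimp only
  rw [pvFoldA_norm,
    pvMain (((PySem.Str.splitlines fc).map PySem.Str.strip).filter (fun l => PySem.Str.len l ≠ 0))
      [] PySem.Dict.empty [] rfl, List.nil_append]
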